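-- pv_equiv track=rewrite | github.com/JwahoonKim/PS | SW_Expert/D3_Level/1215.py | hori_check
-- ===== SOURCE A (Python) =====
-- def hori_check(graph, N):
--     #8 - N + 1 끼지 확인
--     count = 0
--     flag = 0
--     for i in range(8):
--         for j in range(9 - N):
--             for k in range(N):
--                 if graph[i][j + k] != graph[i][N - 1 + j - k]:
--                     break
--                 else: flag += 1
--             if flag == N:
--                 count += 1
--             flag = 0
--     return count
-- ===== SOURCE B (Python) =====
-- def hori_check(graph, N):
--     if N < 1 or N > 8:
--         return 0
--     count = 0
--     for i in range(8):
--         for j in range(9 - N):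
--             s = graph[i][j:j + N]
--             if s == s[::-1]:
--                 count += 1
--     return count
-- ===== Notes on version B (the rewrite author's own statement) =====
-- stated objective: simpler
-- what changed: B replaces A's inner symmetric-index comparison loop with its flag counter and break by a guard on the valid window length and a slice-equals-its-reversal palindrome test per window.
-- intended difference: On N = 0, A returns 72 because its empty inner loop leaves flag = 0 = N so every window of every row counts, while B returns 0; zero-length windows are not palindromes of the requested length, so 0 is the intended count. — e.g. on hori_check([], 0): A returns 72, B returns 0
import Mathlib
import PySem

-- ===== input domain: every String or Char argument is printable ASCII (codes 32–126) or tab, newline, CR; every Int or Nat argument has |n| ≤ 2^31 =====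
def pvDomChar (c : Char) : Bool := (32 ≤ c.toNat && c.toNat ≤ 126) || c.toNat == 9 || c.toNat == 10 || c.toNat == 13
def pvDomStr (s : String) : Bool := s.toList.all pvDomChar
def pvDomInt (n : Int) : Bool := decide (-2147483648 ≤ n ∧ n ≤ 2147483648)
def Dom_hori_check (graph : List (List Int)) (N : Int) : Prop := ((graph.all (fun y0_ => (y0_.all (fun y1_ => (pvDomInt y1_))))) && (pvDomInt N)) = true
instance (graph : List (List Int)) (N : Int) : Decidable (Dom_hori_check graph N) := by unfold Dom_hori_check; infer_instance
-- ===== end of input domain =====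

-- B replaces A's inner symmetric-index comparison loop (flag counter + break) with a
-- slice-and-reverse palindrome test per window; objective: simpler. Same window set.

-- ===== PORT A =====
-- A's inner 'for k in range(N): if mismatch: break; else flag += 1' loop; under Pre_ all
-- indices are in range, so pyGetD is exact for graph[i][...].
def pvKloopA (row : List Int) (j N : Int) : List Int → Int → Int
  | [], flag => flag
  | k :: ks, flag =>
    if PySem.List.pyGetD row (j + k) 0 ≠ PySem.List.pyGetD row (N - 1 + j - k) 0 then flag
    else pvKloopA row j N ks (flag + 1)

def hori_check (graph : List (List Int)) (N : Int) : Int :=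
  (PySem.List.pyRange 0 8 1).foldl (fun count i =>
    (PySem.List.pyRange 0 (9 - N) 1).foldl (fun count j =>
      let flag := pvKloopA (PySem.List.pyGetD graph i []) j N (PySem.List.pyRange 0 N 1) 0
      if flag = N then count + 1 else count) count) 0

-- ===== PORT B =====
def hori_check_alt (graph : List (List Int)) (N : Int) : Int :=
  if N < 1 ∨ 8 < N then 0
  else
    (PySem.List.pyRange 0 8 1).foldl (fun count i =>
      (PySem.List.pyRange 0 (9 - N) 1).foldl (fun count j =>
        let s := PySem.List.slice (PySem.List.pyGetD graph i []) (some j) (some (j + N))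
        if s = s.reverse then count + 1 else count) count) 0

-- ===== PRECONDITION & SPEC =====
-- For 1 ≤ N ≤ 8 (the only case in which A subscripts the grid) A reads graph[i][k] for
-- all i < 8, k < 8, so Pre_ requires exactly the 8-row, row-length ≥ 8 shape on which A
-- returns instead of raising IndexError; for all other N, A subscripts nothing and Pre_
-- requires nothing.
def Pre_hori_check (graph : List (List Int)) (N : Int) : Prop :=
  (1 ≤ N ∧ N ≤ 8) → (8 ≤ graph.length ∧ ∀ row ∈ graph.take 8, 8 ≤ row.length)
instance (graph : List (List Int)) (N : Int) : Decidable (Pre_hori_check graph N) := by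
  unfold Pre_hori_check; infer_instance

def pvWitness_hori_check : List (List Int) × Int :=
  ([[1,2,2,1,0,0,0,0],[0,0,0,0,0,0,0,0],[0,1,0,1,0,1,0,1],[7,7,7,7,7,7,7,7],
    [1,2,3,4,5,6,7,8],[0,0,0,0,0,0,0,0],[3,3,3,3,3,3,3,3],[0,0,0,0,0,0,0,0]], 4)

-- On N = 0, A returns 72 because its empty inner loop leaves flag = 0 = N so every window
-- of every row counts, while B returns 0; zero-length windows are not palindromes of the
-- requested length, so 0 is the intended count.
def D_hori_check (graph : List (List Int)) (N : Int) : Prop := N = 0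
instance (graph : List (List Int)) (N : Int) : Decidable (D_hori_check graph N) := by unfold D_hori_check; infer_instance

def Spec_hori_check (graph : List (List Int)) (N : Int) (out : Int) : Prop := ¬ D_hori_check graph N → out = hori_check_alt graph N
instance (graph : List (List Int)) (N : Int) (out : Int) : Decidable (Spec_hori_check graph N out) := by unfold Spec_hori_check; infer_instance

def pvDiffWitness_hori_check : List (List Int) × Int := ([], 0)
def pvDiffWitnessOut_hori_check : Int × Int := (72, 0)

-- ===== CLAIM (what is proved, stated in full; the proofs are below) =====
def Claim_unchanged_hori_check : Prop := ∀ (graph : List (List Int)) (N : Int), Dom_hori_check graph N → Pre_hori_check graph N → Spec_hori_check graph N (hori_check graph N)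
def Claim_changed_hori_check : Prop := Dom_hori_check (pvDiffWitness_hori_check.1) (pvDiffWitness_hori_check.2) ∧ Pre_hori_check (pvDiffWitness_hori_check.1) (pvDiffWitness_hori_check.2) ∧ D_hori_check (pvDiffWitness_hori_check.1) (pvDiffWitness_hori_check.2) ∧ hori_check (pvDiffWitness_hori_check.1) (pvDiffWitness_hori_check.2) = pvDiffWitnessOut_hori_check.1 ∧ hori_check_alt (pvDiffWitness_hori_check.1) (pvDiffWitness_hori_check.2) = pvDiffWitnessOut_hori_check.2 ∧ pvDiffWitnessOut_hori_check.1 ≠ pvDiffWitnessOut_hori_check.2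
def Claim_exact_hori_check : Prop := ∀ (graph : List (List Int)) (N : Int), Dom_hori_check graph N → Pre_hori_check graph N → D_hori_check graph N → hori_check graph N ≠ hori_check_alt graph N

-- ===== LEMMAS AND PROOFS =====

-- a foldl whose body ignores the element leaves the accumulator unchanged
lemma foldl_const_acc (l : List Int) (init : Int) :
    l.foldl (fun c (_ : Int) => c) init = init := by
  induction l generalizing init with
  | nil => rfl
  | cons x xs ih => exact ih init

-- the k-loop reaches flag + len exactly when every compared pair matches
lemma pvKloopA_eq_iff (row : List Int) (j N : Int) :
    ∀ (ks : List Int) (flag : Int),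
      pvKloopA row j N ks flag = flag + ks.length ↔
        ∀ k ∈ ks, PySem.List.pyGetD row (j + k) 0 = PySem.List.pyGetD row (N - 1 + j - k) 0 := by
  intro ks
  induction ks with
  | nil => intro flag; simp [pvKloopA]
  | cons k ks ih =>
    intro flag
    simp only [pvKloopA, List.mem_cons, List.length_cons]
    split
    · rename_i hne
      constructor
      · intro h; exfalso; push_cast at h; omega
      · intro h; exact absurd (h k (Or.inl rfl)) hne
    · rename_i heq
      rw [not_not] at heq
      rw [show (flag + ((ks.length + 1 : Nat) : Int)) = (flag + 1) + ks.length by push_cast; ring,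
        ih (flag + 1)]
      constructor
      · intro h x hx; rcases hx with rfl | hx
        · exact heq
        · exact h x hx
      · intro h x hx; exact h x (Or.inr hx)

-- palindrome ↔ symmetric entries, stated with getD to avoid dependent proofs
lemma palindrome_iff_getD (s : List Int) :
    s = s.reverse ↔ ∀ k < s.length, s.getD k 0 = s.getD (s.length - 1 - k) 0 := by
  constructor
  · intro h k hk
    rw [List.getD_eq_getElem s 0 hk, List.getD_eq_getElem s 0 (by omega)]
    calc s[k] = s.reverse[k]'(by simpa using hk) := List.getElem_of_eq h hk
      _ = s[s.length - 1 - k]'(by omega) := by rw [List.getElem_reverse]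
  · intro h
    apply List.ext_getElem (by simp)
    intro k hk _
    rw [List.getElem_reverse]
    have := h k hk
    rw [List.getD_eq_getElem s 0 hk, List.getD_eq_getElem s 0 (by omega)] at this
    exact this

-- one window: A's flag test agrees with B's slice-reversal test
lemma window_eq (row : List Int) (N j : Int)
    (h8 : 8 ≤ row.length) (hN1 : 1 ≤ N) (hN8 : N ≤ 8) (hj0 : 0 ≤ j) (hj : j ≤ 8 - N) :
    (pvKloopA row j N (PySem.List.pyRange 0 N 1) 0 = N) ↔
      (PySem.List.slice row (some j) (some (j + N)) =
       (PySem.List.slice row (some j) (some (j + N))).reverse) := by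
  set s := PySem.List.slice row (some j) (some (j + N)) with hs
  have hslice : s = (row.drop j.toNat).take N.toNat := by
    rw [hs, PySem.List.slice_toNat row hj0 (by omega)]
    congr 1
    omega
  have hlen : s.length = N.toNat := by
    rw [hslice]; simp; omega
  have hrange : (PySem.List.pyRange 0 N 1).length = N.toNat := by
    rw [PySem.List.length_pyRange_one]; norm_num
  have hsget : ∀ k < N.toNat, s.getD k 0 = PySem.List.pyGetD row (j + k) 0 := by
    intro k hk
    have hidx : j.toNat + k < row.length := by omega
    rw [hslice]
    rw [List.getD_eq_getElem _ 0 (n := k) (by simp; omega)]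
    rw [List.getElem_take, List.getElem_drop]
    rw [PySem.List.pyGetD_eq_getElem row 0 (by omega) (by omega)]
    congr 1
    omega
  have hiff := pvKloopA_eq_iff row j N (PySem.List.pyRange 0 N 1) 0
  rw [show ((0 : Int) + ((PySem.List.pyRange 0 N 1).length : Int)) = N by rw [hrange]; omega] at hiff
  rw [hiff]
  rw [palindrome_iff_getD]
  constructor
  · intro h k hk
    have hkN : k < N.toNat := by omega
    rw [hsget k hkN, hsget (s.length - 1 - k) (by omega)]
    have := h (k : Int) (by rw [PySem.List.mem_pyRange_one]; constructor <;> [positivity; omega])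
    rw [this]
    congr 1
    omega
  · intro h k hkmem
    rw [PySem.List.mem_pyRange_one] at hkmem
    obtain ⟨hk0, hkN⟩ := hkmem
    have hkn : k.toNat < N.toNat := by omega
    have h1 := h k.toNat (by omega)
    rw [hsget k.toNat hkn, hsget (s.length - 1 - k.toNat) (by omega)] at h1
    rw [show (j + k : Int) = j + (k.toNat : Int) by omega, h1]
    congr 1
    omega

-- row picked by the outer loop satisfies the shape hypothesis
lemma row_len (graph : List (List Int)) (i : Int)
    (hg : 8 ≤ graph.length) (hrows : ∀ row ∈ graph.take 8, 8 ≤ row.length)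
    (hi0 : 0 ≤ i) (hi8 : i < 8) :
    8 ≤ (PySem.List.pyGetD graph i []).length := by
  have hlt : i.toNat < graph.length := by omega
  rw [PySem.List.pyGetD_eq_getElem graph [] hi0 (by omega)]
  apply hrows
  have h8 : i.toNat < (graph.take 8).length := by simp; omega
  have : (graph.take 8)[i.toNat]'h8 = graph[i.toNat]'hlt := List.getElem_take
  rw [← this]
  exact List.getElem_mem h8

-- A returns 0 whenever the flag test can never fire (N ≠ 0 with an empty inner range, or an empty window range)
lemma portA_eq_zero_of_lt_one (graph : List (List Int)) (N : Int) (hN : N < 1) (hN0 : N ≠ 0) :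
    hori_check graph N = 0 := by
  unfold hori_check
  have h : ∀ (acc : Int), ∀ i ∈ PySem.List.pyRange 0 8 1,
      (PySem.List.pyRange 0 (9 - N) 1).foldl (fun count j =>
        let flag := pvKloopA (PySem.List.pyGetD graph i []) j N (PySem.List.pyRange 0 N 1) 0
        if flag = N then count + 1 else count) acc = (fun c (_ : Int) => c) acc i := by
    intro acc i _
    have hbody : ∀ (acc' : Int), ∀ j ∈ PySem.List.pyRange 0 (9 - N) 1,
        (fun count j =>
          let flag := pvKloopA (PySem.List.pyGetD graph i []) j N (PySem.List.pyRange 0 N 1) 0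
          if flag = N then count + 1 else count) acc' j = (fun c (_ : Int) => c) acc' j := by
      intro acc' j _
      have hA : pvKloopA (PySem.List.pyGetD graph i []) j N (PySem.List.pyRange 0 N 1) 0 = 0 := by
        rw [PySem.List.pyRange_one_eq_nil (by omega)]
        rfl
      simp only [hA]
      rw [if_neg (by omega)]
    rw [PySem.List.foldl_congr_mem _ _ _ _ hbody, foldl_const_acc]
  rw [PySem.List.foldl_congr_mem _ _ _ _ h, foldl_const_acc]

lemma portA_eq_zero_of_gt_eight (graph : List (List Int)) (N : Int) (hN : 8 < N) :
    hori_check graph N = 0 := by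
  unfold hori_check
  have h : ∀ (acc : Int), ∀ i ∈ PySem.List.pyRange 0 8 1,
      (PySem.List.pyRange 0 (9 - N) 1).foldl (fun count j =>
        let flag := pvKloopA (PySem.List.pyGetD graph i []) j N (PySem.List.pyRange 0 N 1) 0
        if flag = N then count + 1 else count) acc = (fun c (_ : Int) => c) acc i := by
    intro acc i _
    rw [PySem.List.pyRange_one_eq_nil (a := 0) (b := 9 - N) (by omega)]
    rfl
  rw [PySem.List.foldl_congr_mem _ _ _ _ h, foldl_const_acc]

-- ===== VERDICT (by name: the statement is the Claim_ definition above) =====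
theorem hori_check_spec : Claim_unchanged_hori_check := by
  intro graph N _ hpre hnD
  unfold D_hori_check at hnD
  by_cases hsmall : N < 1
  · rw [portA_eq_zero_of_lt_one graph N hsmall hnD]
    unfold hori_check_alt
    rw [if_pos (Or.inl hsmall)]
  by_cases hbig : 8 < N
  · rw [portA_eq_zero_of_gt_eight graph N hbig]
    unfold hori_check_alt
    rw [if_pos (Or.inr hbig)]
  · -- 1 ≤ N ≤ 8
    have hN1 : 1 ≤ N := by omega
    have hN8 : N ≤ 8 := by omega
    obtain ⟨hg, hrows⟩ := hpre ⟨hN1, hN8⟩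
    unfold hori_check hori_check_alt
    rw [if_neg (by omega)]
    apply PySem.List.foldl_congr_mem
    intro acc i hi
    rw [PySem.List.mem_pyRange_one] at hi
    apply PySem.List.foldl_congr_mem
    intro acc' jj hjj
    rw [PySem.List.mem_pyRange_one] at hjj
    have hrow := row_len graph i hg hrows hi.1 hi.2
    have := window_eq (PySem.List.pyGetD graph i []) N jj hrow hN1 hN8 hjj.1 (by omega)
    exact if_congr this rfl rfl

set_option maxRecDepth 4000 in
theorem hori_check_changed : Claim_changed_hori_check := by
  unfold Claim_changed_hori_check; decide

theorem hori_check_tight : Claim_exact_hori_check := by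
  intro graph N _ _ hD
  unfold D_hori_check at hD
  subst hD
  have hB : hori_check_alt graph 0 = 0 := by
    unfold hori_check_alt
    rw [if_pos (Or.inl (by omega))]
  have hA : hori_check graph 0 = 72 := by
    unfold hori_check
    have hk : ∀ (row : List Int) (j : Int),
        pvKloopA row j 0 (PySem.List.pyRange 0 0 1) 0 = 0 := fun _ _ => rfl
    have h : ∀ (acc : Int), ∀ i ∈ PySem.List.pyRange 0 8 1,
        (PySem.List.pyRange 0 (9 - (0 : Int)) 1).foldl (fun count j =>
          let flag := pvKloopA (PySem.List.pyGetD graph i []) j 0 (PySem.List.pyRange 0 0 1) 0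
          if flag = 0 then count + 1 else count) acc = (fun c (_ : Int) => c + 9) acc i := by
      intro acc i _
      have hbody : ∀ (acc' : Int), ∀ j ∈ PySem.List.pyRange 0 (9 - (0 : Int)) 1,
          (fun count j =>
            let flag := pvKloopA (PySem.List.pyGetD graph i []) j 0 (PySem.List.pyRange 0 0 1) 0
            if flag = 0 then count + 1 else count) acc' j = (fun c (_ : Int) => c + 1) acc' j := by
        intro acc' j _
        simp [pvKloopA]
      rw [PySem.List.foldl_congr_mem _ _ _ _ hbody]
      show (PySem.List.pyRange 0 9 1).foldl (fun c (_ : Int) => c + 1) acc = acc + 9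
      rw [show PySem.List.pyRange 0 9 1 = [0,1,2,3,4,5,6,7,8] from by decide]
      simp [List.foldl]
      ring
    rw [PySem.List.foldl_congr_mem _ _ _ _ h]
    rw [show PySem.List.pyRange 0 8 1 = [0,1,2,3,4,5,6,7] from by decide]
    simp [List.foldl]
  rw [hA, hB]
  decide
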